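-- pv_equiv track=rewrite | github.com/urbaneriver426/sp | Unmanned.py | Unmanned
-- ===== SOURCE A (Python) =====
-- def Unmanned(N, L, data):
--     dist = 0
--     count = 0
--     time = 0
--     totalTime = 0
--
--     if L == 0:
--         return N
--
--     for i in range(N):
--         dist += 1
--         if dist == data[count][0]:
--             totalTime = data[count][1] + data[count][2]
--             # общее время полного цикла светофора
--             testTime = time - (totalTime * (time // totalTime))
--             # время прошедшее от начала текущего цикла светофора
--             if testTime < data[count][1] or testTime == totalTime:
--                 time += data[count][1] - testTime
--             else:
--                 time += 1
--             if count < L-1: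
--                 count += 1
--         else:
--             time += 1
--     return time
-- ===== SOURCE B (Python) =====
-- def Unmanned(N, L, data):
--     # Jump light-to-light instead of stepping cell-by-cell: O(L) instead of O(N).
--     if L == 0:
--         return N
--     time = 0
--     pos = 0
--     count = 0
--     while pos < N:
--         p = data[count][0]
--         if not (pos < p <= N):
--             break
--         time += p - 1 - pos            # free driving up to the light's cell
--         green = data[count][1]
--         cyc = green + data[count][2]
--         t = time % cyc
--         time += (green - t) if t < green else 1
--         pos = p
--         if count < L - 1:
--             count += 1
--         else:
--             break
--     return time + max(N - pos, 0)
-- ===== Notes on version B (the rewrite author's own statement) =====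
-- stated objective: faster
-- what changed: B replaces A's per-cell simulation of all N road cells by a jump from traffic light to traffic light, adding each light-free gap's length to the clock in one arithmetic step, so the loop runs at most L times instead of N.
import Mathlib
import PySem

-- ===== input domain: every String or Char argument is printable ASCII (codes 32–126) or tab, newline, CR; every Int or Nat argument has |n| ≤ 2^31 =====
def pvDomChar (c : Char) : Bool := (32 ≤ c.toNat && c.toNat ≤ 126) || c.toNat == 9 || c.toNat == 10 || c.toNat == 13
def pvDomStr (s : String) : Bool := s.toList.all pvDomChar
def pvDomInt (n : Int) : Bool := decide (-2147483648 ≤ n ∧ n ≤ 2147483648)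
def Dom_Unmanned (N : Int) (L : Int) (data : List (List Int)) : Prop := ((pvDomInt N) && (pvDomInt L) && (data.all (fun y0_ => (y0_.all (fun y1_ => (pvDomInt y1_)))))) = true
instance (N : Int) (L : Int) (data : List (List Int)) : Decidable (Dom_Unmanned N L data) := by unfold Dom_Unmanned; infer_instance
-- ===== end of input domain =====

-- B replaces A's per-cell simulation (O(N)) by a jump from traffic light to traffic light (O(L)).

-- ===== PORT A =====
-- one iteration of A's `for i in range(N)` loop over the state (dist, count, time)
def UnmannedStep (L : Int) (data : List (List Int)) (st : Int × Int × Int) : Int × Int × Int :=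
  let dist := st.1 + 1
  let count := st.2.1
  let time := st.2.2
  let row := PySem.List.pyGetD data count []
  if dist = PySem.List.pyGetD row 0 0 then
    let g := PySem.List.pyGetD row 1 0
    let totalTime := g + PySem.List.pyGetD row 2 0
    let testTime := time - totalTime * PySem.Int.floordiv time totalTime
    let time' := if testTime < g ∨ testTime = totalTime then time + (g - testTime) else time + 1
    let count' := if count < L - 1 then count + 1 else count
    (dist, count', time')
  else
    (dist, count, time + 1)

def Unmanned (N : Int) (L : Int) (data : List (List Int)) : Int :=
  if L = 0 then N
  else
    ((PySem.List.pyRange 0 N 1).foldl (fun st _ => UnmannedStep L data st) (0, 0, 0)).2.2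

-- ===== PORT B =====
-- B's `while pos < N` loop: one call per traffic light
def UnmannedAltGo (N : Int) (L : Int) (data : List (List Int)) (count pos time : Int) : Int :=
  if pos < N then
    let row := PySem.List.pyGetD data count []
    let p := PySem.List.pyGetD row 0 0
    if pos < p ∧ p ≤ N then
      let time1 := time + (p - 1 - pos)
      let g := PySem.List.pyGetD row 1 0
      let cyc := g + PySem.List.pyGetD row 2 0
      let t := PySem.Int.mod time1 cyc
      let time2 := if t < g then time1 + (g - t) else time1 + 1
      if h : count < L - 1 then UnmannedAltGo N L data (count + 1) p time2
      else time2 + max (N - p) 0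
    else time + max (N - pos) 0
  else time + max (N - pos) 0
termination_by (L - 1 - count).toNat
decreasing_by omega

def Unmanned_alt (N : Int) (L : Int) (data : List (List Int)) : Int :=
  if L = 0 then N
  else UnmannedAltGo N L data 0 0 0

-- ===== PRECONDITION & SPEC =====
-- "A raises no exception": every traffic-light row A actually reads exists and is
-- nonempty, and every row whose light is reached has ≥ 3 entries and a nonzero cycle
-- (otherwise IndexError / ZeroDivisionError).  Checked to be EXACTLY A's return domain.
-- k counts the light advances A may still make: k = (L - 1 - count).toNat
def preGoUnmanned (N : Int) (L : Int) (data : List (List Int)) (k : Nat) (count pos : Int) : Bool :=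
    if pos < N then
      if 0 ≤ count ∧ count < (data.length : Int) then
        let row := PySem.List.pyGetD data count []
        if row ≠ [] then
          let p := PySem.List.pyGetD row 0 0
          if pos < p ∧ p ≤ N then
            if 3 ≤ row.length ∧ PySem.List.pyGetD row 1 0 + PySem.List.pyGetD row 2 0 ≠ 0 then
              match k with
              | 0 => true
              | k' + 1 => preGoUnmanned N L data k' (count + 1) p
            else false
          else true
        else false
      else false
    else true

def Pre_Unmanned (N : Int) (L : Int) (data : List (List Int)) : Prop :=
  L = 0 ∨ preGoUnmanned N L data (L - 1).toNat 0 0 = true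
instance (N : Int) (L : Int) (data : List (List Int)) : Decidable (Pre_Unmanned N L data) := by
  unfold Pre_Unmanned; infer_instance

def pvWitness_Unmanned : Int × Int × List (List Int) := (5, 1, [[2, 3, 4]])

def Spec_Unmanned (N : Int) (L : Int) (data : List (List Int)) (out : Int) : Prop := out = Unmanned_alt N L data
instance (N : Int) (L : Int) (data : List (List Int)) (out : Int) : Decidable (Spec_Unmanned N L data out) := by unfold Spec_Unmanned; infer_instance

-- ===== CLAIM (what is proved, stated in full; the proofs are below) =====
def Claim_equal_Unmanned : Prop := ∀ (N : Int) (L : Int) (data : List (List Int)), Dom_Unmanned N L data → Pre_Unmanned N L data → Spec_Unmanned N L data (Unmanned N L data)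

-- ===== LEMMAS AND PROOFS =====

theorem foldl_const_iterate {α β : Type} (f : α → α) (l : List β) (s : α) :
    l.foldl (fun a _ => f a) s = f^[l.length] s := by
  induction l generalizing s with
  | nil => rfl
  | cons x xs ih => simpa [Function.iterate_succ_apply] using ih (f s)

-- k consecutive cells with no light: dist and time each advance by k
theorem unmanned_skip (L : Int) (data : List (List Int)) (k : Nat) :
    ∀ (dist count time : Int),
    (∀ j : Nat, j < k → dist + (j + 1 : Nat) ≠ PySem.List.pyGetD (PySem.List.pyGetD data count []) 0 0) →
    (UnmannedStep L data)^[k] (dist, count, time) = (dist + k, count, time + k) := by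
  induction k with
  | zero => intro dist count time _; simp
  | succ k ih =>
    intro dist count time h
    have h0 : dist + 1 ≠ PySem.List.pyGetD (PySem.List.pyGetD data count []) 0 0 := by
      have := h 0 (Nat.succ_pos k); simpa using this
    rw [Function.iterate_succ_apply]
    have hstep : UnmannedStep L data (dist, count, time) = (dist + 1, count, time + 1) := by
      simp [UnmannedStep, h0]
    rw [hstep, ih]
    · simp only [Prod.mk.injEq]
      refine ⟨by push_cast; ring, trivial, by push_cast; ring⟩
    · intro j hj
      have := h (j + 1) (by omega)
      push_cast at this ⊢
      intro hc; apply this; linarith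

-- Python's  t - c*(t//c)  is  t % c,  and it never equals c when c ≠ 0
theorem testTime_eq_mod (t c : Int) : t - c * PySem.Int.floordiv t c = PySem.Int.mod t c := by
  have := PySem.Int.floordiv_mul_add_mod t c
  linarith

theorem mod_ne_self (t c : Int) (hc : c ≠ 0) : PySem.Int.mod t c ≠ c := by
  rcases lt_or_gt_of_ne hc with h | h
  · have := PySem.Int.mod_neg_bounds t h
    omega
  · have := PySem.Int.mod_lt t h
    omega

-- main invariant: from state (pos, count, time) with pos + n = N and A crash-free,
-- n more cell-steps of A compute exactly B's light-to-light jump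
theorem unmanned_main (L : Int) (data : List (List Int)) :
    ∀ n : Nat, ∀ (k : Nat) (N count pos time : Int), pos + (n : Int) = N →
    k = (L - 1 - count).toNat →
    preGoUnmanned N L data k count pos = true →
    ((UnmannedStep L data)^[n] (pos, count, time)).2.2 = UnmannedAltGo N L data count pos time := by
  intro n
  induction n using Nat.strong_induction_on with
  | _ n ih =>
    intro k N count pos time hpos hk hpre
    by_cases hlt : pos < N
    · -- n ≥ 1
      have hn : 1 ≤ n := by by_contra h; omega
      rw [preGoUnmanned] at hpre
      rw [if_pos hlt] at hpre
      set row := PySem.List.pyGetD data count [] with hrowdef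
      set p := PySem.List.pyGetD row 0 0 with hpdef
      simp only [← hpdef] at hpre
      have hcnt : 0 ≤ count ∧ count < (data.length : Int) := by
        by_contra hc; rw [if_neg hc] at hpre; exact absurd hpre (by simp)
      rw [if_pos hcnt] at hpre
      have hrow : row ≠ [] := by
        by_contra hc; rw [if_neg (by simpa using hc)] at hpre; exact absurd hpre (by simp)
      rw [if_pos (by simpa using hrow)] at hpre
      by_cases hmatch : pos < p ∧ p ≤ N
      · -- a light is reached at cell p
        rw [if_pos hmatch] at hpre
        have hlc : 3 ≤ row.length ∧ PySem.List.pyGetD row 1 0 + PySem.List.pyGetD row 2 0 ≠ 0 := by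
          by_contra hc; rw [if_neg hc] at hpre; exact absurd hpre (by simp)
        rw [if_pos hlc] at hpre
        obtain ⟨hlen, hcyc0⟩ := hlc
        set g := PySem.List.pyGetD row 1 0 with hgdef
        set cyc := g + PySem.List.pyGetD row 2 0 with hcycdef
        have hcyc : cyc ≠ 0 := hcyc0
        set m : Nat := (p - 1 - pos).toNat with hmdef
        have hm : (m : Int) = p - 1 - pos := by omega
        have hmn : m + 1 ≤ n := by omega
        -- split the n steps: m free cells, the light cell, then the rest
        have hsplit : n = (n - (m + 1)) + 1 + m := by omega
        rw [hsplit, Function.iterate_add_apply, Function.iterate_add_apply]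
        rw [unmanned_skip L data m pos count time
          (by intro j hj; rw [← hrowdef, ← hpdef]; omega)]
        have hne := mod_ne_self (time + m) cyc hcyc
        have hstep : UnmannedStep L data (pos + m, count, time + m) =
            (p, (if count < L - 1 then count + 1 else count),
             (if PySem.Int.mod (time + m) cyc < g then (time + m) + (g - PySem.Int.mod (time + m) cyc)
              else (time + m) + 1)) := by
          have hdm : pos + (m : Int) + 1 = p := by omega
          simp only [UnmannedStep, hdm, ← hrowdef, ← hpdef, ← hgdef, ← hcycdef,
            testTime_eq_mod]
          simp [hne]
        rw [Function.iterate_one, hstep]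
        set time2 := (if PySem.Int.mod (time + m) cyc < g then (time + m) + (g - PySem.Int.mod (time + m) cyc)
              else (time + m) + 1) with htime2
        rw [UnmannedAltGo, if_pos hlt]
        simp only [← hrowdef, ← hpdef, ← hgdef, ← hcycdef]
        rw [if_pos hmatch]
        have htimes : time + (p - 1 - pos) = time + (m : Int) := by omega
        rw [htimes, ← htime2]
        by_cases hcl : count < L - 1
        · -- advance to the next light
          simp only [if_pos hcl]
          rw [dif_pos hcl]
          obtain ⟨k', rfl⟩ : ∃ k', k = k' + 1 := ⟨k - 1, by omega⟩
          exact ih (n - (m + 1)) (by omega) k' N (count + 1) p time2 (by omega) (by omega) hpre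
        · -- last light: the remaining N - p cells are free
          simp only [if_neg hcl]
          rw [dif_neg hcl]
          rw [unmanned_skip L data (n - (m + 1)) p count time2
            (by intro j hj; rw [← hrowdef, ← hpdef]; omega)]
          show time2 + ((n - (m + 1) : Nat) : Int) = time2 + max (N - p) 0
          have h2 : p ≤ N := hmatch.2
          omega
      · -- no light in the remaining cells: every step just adds 1
        have hnm : ∀ j : Nat, j < n → pos + (j + 1 : Nat) ≠ p := by
          intro j hj hc
          apply hmatch
          constructor <;> omega
        rw [unmanned_skip L data n pos count time
          (by intro j hj; rw [← hrowdef, ← hpdef]; exact hnm j hj)]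
        rw [UnmannedAltGo, if_pos hlt]
        simp only [← hrowdef, ← hpdef]
        rw [if_neg hmatch]
        show time + (n : Int) = time + max (N - pos) 0
        omega
    · -- pos = N (n = 0): both sides are `time`
      have hn0 : n = 0 := by omega
      subst hn0
      rw [UnmannedAltGo, if_neg hlt, Function.iterate_zero_apply]
      show time = time + max (N - pos) 0
      have : max (N - pos) 0 = 0 := by omega
      omega

-- ===== VERDICT (by name: the statement is the Claim_ definition above) =====
theorem Unmanned_spec : Claim_equal_Unmanned := by
  intro N L data _ hpre
  unfold Spec_Unmanned Unmanned Unmanned_alt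
  by_cases hL : L = 0
  · simp [hL]
  · simp only [hL, if_neg, not_false_iff]
    rcases hpre with h | hpre
    · exact absurd h hL
    rw [foldl_const_iterate (UnmannedStep L data) _ (0,0,0), PySem.List.length_pyRange_one]
    by_cases hN : 0 < N
    · exact unmanned_main L data (N - 0).toNat (L - 1).toNat N 0 0 0 (by omega) (by omega) hpre
    · have h0 : (N - 0).toNat = 0 := by omega
      rw [h0]
      rw [UnmannedAltGo]
      simp only [if_neg hN, Function.iterate_zero_apply]
      omega
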